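-- pv_equiv track=rewrite | github.com/bstrdlpn/cecs-277 | Lab_03/main.py | get_letters_remaining
-- ===== SOURCE A (Python) =====
-- def get_letters_remaining(incorrect, correct):
--     """
--     given the list of incorrect guesses and the list of correct guesses, return
--     the list of remaining letters in the alphabet to choose from (do not display
--     the list from within the function).
--
--     Parameters:
--         incorrect : list of incorrect guesses
--         correct :   list of correct guesses
--
--     Returns:
--         the list of remaining letters in the alphabet to choose from
--     """
--     alphabet = ['A', 'B', 'C', 'D', 'E', 'F', 'G', 'H', 'I', 'J', 'K', 'L', 'M',
--                 'N', 'O', 'P', 'Q', 'R', 'S', 'T', 'U', 'V', 'W', 'X', 'Y', 'Z']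
--
--     # loops which remove the elements contained in incorrect and correct from
--     # alphabet list, which contains the remaining letters
--     for ele in incorrect:
--         if ele in alphabet:
--             alphabet.remove(ele)
--
--     for ele in correct:
--         if ele in alphabet:
--             alphabet.remove(ele)
--
--     return alphabet
-- ===== SOURCE B (Python) =====
-- def get_letters_remaining(incorrect, correct):
--     """Set-based rewrite: iterate the fixed alphabet once, keeping letters not guessed."""
--     guessed = set(incorrect) | set(correct)
--     alphabet = ['A', 'B', 'C', 'D', 'E', 'F', 'G', 'H', 'I', 'J', 'K', 'L', 'M',
--                 'N', 'O', 'P', 'Q', 'R', 'S', 'T', 'U', 'V', 'W', 'X', 'Y', 'Z']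
--     return [c for c in alphabet if c not in guessed]
-- ===== Notes on version B (the rewrite author's own statement) =====
-- stated objective: idiomatic
-- what changed: Instead of mutating the alphabet list by repeatedly scanning and removing for each guess, B builds one set of all guesses and filters the fixed alphabet in a single comprehension (traversal target changes from the guess lists to the alphabet).
import Mathlib
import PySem

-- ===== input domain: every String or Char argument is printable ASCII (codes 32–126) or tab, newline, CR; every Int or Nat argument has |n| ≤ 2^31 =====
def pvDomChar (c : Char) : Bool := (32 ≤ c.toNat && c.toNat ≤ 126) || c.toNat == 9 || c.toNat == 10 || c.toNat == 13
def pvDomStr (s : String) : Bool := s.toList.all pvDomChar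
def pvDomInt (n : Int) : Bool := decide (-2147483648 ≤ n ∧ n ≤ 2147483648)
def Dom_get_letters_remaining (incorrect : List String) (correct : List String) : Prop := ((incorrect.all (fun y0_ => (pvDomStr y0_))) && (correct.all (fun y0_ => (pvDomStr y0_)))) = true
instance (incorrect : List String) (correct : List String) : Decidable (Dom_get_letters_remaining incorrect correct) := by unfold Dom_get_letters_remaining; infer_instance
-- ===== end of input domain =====

-- ===== PORT A =====
-- B rewrites A's repeated scan-and-remove over a mutable alphabet as one filter of the
-- fixed alphabet against a set of all guesses (objective: idiomatic).
def pyAlphabet : List String :=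
  ["A", "B", "C", "D", "E", "F", "G", "H", "I", "J", "K", "L", "M",
   "N", "O", "P", "Q", "R", "S", "T", "U", "V", "W", "X", "Y", "Z"]

-- one iteration of A's loop body: `if ele in alphabet: alphabet.remove(ele)`
def pyRemoveStep (alph : List String) (ele : String) : List String :=
  if alph.contains ele then
    match PySem.List.remove? alph ele with
    | some a => a
    | none => alph   -- unreachable: guarded by the membership test
  else alph

def get_letters_remaining (incorrect : List String) (correct : List String) : List String :=
  let alph1 := incorrect.foldl pyRemoveStep pyAlphabet
  correct.foldl pyRemoveStep alph1

-- ===== PORT B =====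
def get_letters_remaining_alt (incorrect : List String) (correct : List String) : List String :=
  let guessed : PySem.Set String :=
    PySem.Set.union (PySem.Set.ofList incorrect) (PySem.Set.ofList correct)
  pyAlphabet.filter (fun c => !(PySem.Set.contains guessed c))

-- ===== PRECONDITION & SPEC =====
def Spec_get_letters_remaining (incorrect : List String) (correct : List String) (out : List String) : Prop := out = get_letters_remaining_alt incorrect correct
instance (incorrect : List String) (correct : List String) (out : List String) : Decidable (Spec_get_letters_remaining incorrect correct out) := by unfold Spec_get_letters_remaining; infer_instance

-- ===== CLAIM (what is proved, stated in full; the proofs are below) =====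
def Claim_equal_get_letters_remaining : Prop := ∀ (incorrect : List String) (correct : List String), Dom_get_letters_remaining incorrect correct → Spec_get_letters_remaining incorrect correct (get_letters_remaining incorrect correct)

-- ===== LEMMAS AND PROOFS =====

-- On a duplicate-free list, one loop iteration of A is a filter.
theorem pyRemoveStep_eq_filter (alph : List String) (ele : String) (h : alph.Nodup) :
    pyRemoveStep alph ele = alph.filter (fun c => c != ele) := by
  unfold pyRemoveStep
  by_cases hm : ele ∈ alph
  · rw [PySem.List.remove?_eq_some_erase _ _ hm]
    simp [hm, List.Nodup.erase_eq_filter h]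
  · have : alph.filter (fun c => c != ele) = alph := by
      apply List.filter_eq_self.mpr
      intro a ha
      simp
      exact fun he => hm (he ▸ ha)
    simp [hm, this]

-- Folding A's loop over a duplicate-free list filters out all the guesses at once.
theorem foldl_pyRemoveStep (gs : List String) (alph : List String) (h : alph.Nodup) :
    gs.foldl pyRemoveStep alph = alph.filter (fun c => !(gs.contains c)) := by
  induction gs generalizing alph with
  | nil => simp
  | cons g gs ih =>
    rw [List.foldl_cons, pyRemoveStep_eq_filter alph g h,
        ih _ (List.Nodup.filter _ h), List.filter_filter]
    apply List.filter_congr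
    intro c _
    by_cases hc : c = g <;> simp [hc]

theorem pyAlphabet_nodup : pyAlphabet.Nodup := by decide

-- ===== VERDICT (by name: the statement is the Claim_ definition above) =====
theorem get_letters_remaining_spec : Claim_equal_get_letters_remaining := by
  intro incorrect correct _
  show _ = _
  unfold get_letters_remaining get_letters_remaining_alt
  rw [foldl_pyRemoveStep incorrect pyAlphabet pyAlphabet_nodup,
      foldl_pyRemoveStep correct _ (List.Nodup.filter _ pyAlphabet_nodup),
      List.filter_filter]
  apply List.filter_congr
  intro c _
  simp [PySem.Set.mem_union, PySem.Set.mem_ofList]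
  rw [Bool.and_comm]
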